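-- pv_equiv track=rewrite | github.com/husseinngobi/Aviator | integrity_monitor.py | recursive_signature_correction
-- ===== SOURCE A (Python) =====
-- def normalize_signature(signature):
--     text = str(signature or "").strip().upper()
--     if not text:
--         return "UNKNOWN"
--     collapsed = "_".join(part for part in text.replace("-", "_").split() if part)
--     return collapsed or "UNKNOWN"
--
-- def recursive_signature_correction(signature, max_depth=3):
--     """Recursively normalize a noisy packet signature into a stable label."""
--     value = normalize_signature(signature)
--     if max_depth <= 0:
--         return value
--
--     cleaned = value.replace("__", "_").strip("_")
--     if cleaned == value:
--         return cleaned or "UNKNOWN"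
--     return recursive_signature_correction(cleaned, max_depth=max_depth - 1)
-- ===== SOURCE B (Python) =====
-- def normalize_signature(signature):
--     text = str(signature or "").strip().upper()
--     if not text:
--         return "UNKNOWN"
--     collapsed = "_".join(part for part in text.replace("-", "_").split() if part)
--     return collapsed or "UNKNOWN"
--
-- def recursive_signature_correction(signature, max_depth=3):
--     """Iteratively normalize a noisy packet signature into a stable label."""
--     value = normalize_signature(signature)
--     while max_depth > 0:
--         cleaned = value.replace("__", "_").strip("_")
--         if cleaned == value:
--             return cleaned or "UNKNOWN"
--         value = normalize_signature(cleaned)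
--         max_depth -= 1
--     return value
-- ===== Notes on version B (the rewrite author's own statement) =====
-- stated objective: idiomatic
-- what changed: Replaced the bounded tail recursion with an explicit while loop that keeps the current value and decrements max_depth in place, keeping the normalize_signature helper unchanged.
import Mathlib
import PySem

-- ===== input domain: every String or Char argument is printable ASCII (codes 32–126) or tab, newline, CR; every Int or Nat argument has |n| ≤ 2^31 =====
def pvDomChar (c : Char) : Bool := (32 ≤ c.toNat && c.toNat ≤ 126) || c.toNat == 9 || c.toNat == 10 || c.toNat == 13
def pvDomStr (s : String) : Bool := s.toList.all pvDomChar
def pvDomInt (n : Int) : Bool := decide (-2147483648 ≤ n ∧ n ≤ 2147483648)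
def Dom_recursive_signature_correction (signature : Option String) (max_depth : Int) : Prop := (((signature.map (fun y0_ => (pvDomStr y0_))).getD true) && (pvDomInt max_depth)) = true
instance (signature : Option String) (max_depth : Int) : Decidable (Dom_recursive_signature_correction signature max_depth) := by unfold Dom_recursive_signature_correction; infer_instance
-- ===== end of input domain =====

-- B rewrites A's bounded tail recursion as an explicit while loop over the current value (objective: idiomatic; same cost).

-- ===== PORT A =====
-- shared helper: normalize_signature, identical in Source A and Source B
def normalize_signature (signature : Option String) : String :=
  let text := PySem.Str.upper (PySem.Str.strip (signature.getD ""))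
  if text = "" then "UNKNOWN"
  else
    let collapsed := PySem.Str.join "_"
      ((PySem.Str.split₀ (PySem.Str.replace text "-" "_")).filter (fun part => part ≠ ""))
    if collapsed = "" then "UNKNOWN" else collapsed

def recursive_signature_correction (signature : Option String) (max_depth : Int) : String :=
  let value := normalize_signature signature
  if max_depth ≤ 0 then value
  else
    let cleaned := PySem.Str.stripChars (PySem.Str.replace value "__" "_") "_"
    if cleaned = value then (if cleaned = "" then "UNKNOWN" else cleaned)
    else recursive_signature_correction (some cleaned) (max_depth - 1)
termination_by max_depth.toNat
decreasing_by omega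

-- ===== PORT B =====
-- the while loop of Source B: fuel = remaining max_depth, state = current value
def rscLoop : Nat → String → String
  | 0, value => value
  | n + 1, value =>
    let cleaned := PySem.Str.stripChars (PySem.Str.replace value "__" "_") "_"
    if cleaned = value then (if cleaned = "" then "UNKNOWN" else cleaned)
    else rscLoop n (normalize_signature (some cleaned))

def recursive_signature_correction_alt (signature : Option String) (max_depth : Int) : String :=
  rscLoop max_depth.toNat (normalize_signature signature)

-- ===== PRECONDITION & SPEC =====
def Spec_recursive_signature_correction (signature : Option String) (max_depth : Int) (out : String) : Prop := out = recursive_signature_correction_alt signature max_depth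
instance (signature : Option String) (max_depth : Int) (out : String) : Decidable (Spec_recursive_signature_correction signature max_depth out) := by unfold Spec_recursive_signature_correction; infer_instance

-- ===== CLAIM (what is proved, stated in full; the proofs are below) =====
def Claim_equal_recursive_signature_correction : Prop := ∀ (signature : Option String) (max_depth : Int), Dom_recursive_signature_correction signature max_depth → Spec_recursive_signature_correction signature max_depth (recursive_signature_correction signature max_depth)

-- ===== LEMMAS AND PROOFS =====
theorem rsc_eq_loop (n : Nat) (max_depth : Int) (signature : Option String)
    (h : max_depth.toNat = n) :
    recursive_signature_correction signature max_depth
      = rscLoop n (normalize_signature signature) := by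
  induction n generalizing max_depth signature with
  | zero =>
    rw [recursive_signature_correction, rscLoop]
    simp [show max_depth ≤ 0 by omega]
  | succ n ih =>
    rw [recursive_signature_correction, rscLoop]
    have hpos : ¬ max_depth ≤ 0 := by omega
    simp only [hpos, if_false]
    split
    · rfl
    · exact ih (max_depth - 1) _ (by omega)

-- ===== VERDICT (by name: the statement is the Claim_ definition above) =====
theorem recursive_signature_correction_spec : Claim_equal_recursive_signature_correction := by
  intro signature max_depth _
  unfold Spec_recursive_signature_correction recursive_signature_correction_alt
  exact rsc_eq_loop max_depth.toNat max_depth signature rfl
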